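-- pv_equiv track=rewrite | github.com/CCCanna/journey | util.py | simplify_time
-- ===== SOURCE A (Python) =====
-- def simplify_time(time_series):
--     simplified = list()
--     index = 0
--     while True:
--         simplified.append(time_series[index])
--         index = search_for_nearest(time_series, time_series[index] + 3600)
--         if not index:
--             break
--     return simplified
--
-- def search_for_nearest(series, value):
--     distance = [serial - value for serial in series]
--     for index, val in enumerate(distance):
--         if val >= 0:
--             return index
--     return 0
-- ===== SOURCE B (Python) =====
-- def simplify_time(time_series):
--     simplified = [time_series[0]]
--     threshold = time_series[0] + 3600
--     for t in time_series[1:]: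
--         if t >= threshold:
--             simplified.append(t)
--             threshold = t + 3600
--     return simplified
-- ===== Notes on version B (the rewrite author's own statement) =====
-- stated objective: faster
-- what changed: Replaced the loop that rescans the whole list from index 0 on every step (via search_for_nearest) with a single forward pass keeping a running threshold; the agreement holds on every nonempty list because each rescan's hit always lies strictly beyond the current index.
import Mathlib
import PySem

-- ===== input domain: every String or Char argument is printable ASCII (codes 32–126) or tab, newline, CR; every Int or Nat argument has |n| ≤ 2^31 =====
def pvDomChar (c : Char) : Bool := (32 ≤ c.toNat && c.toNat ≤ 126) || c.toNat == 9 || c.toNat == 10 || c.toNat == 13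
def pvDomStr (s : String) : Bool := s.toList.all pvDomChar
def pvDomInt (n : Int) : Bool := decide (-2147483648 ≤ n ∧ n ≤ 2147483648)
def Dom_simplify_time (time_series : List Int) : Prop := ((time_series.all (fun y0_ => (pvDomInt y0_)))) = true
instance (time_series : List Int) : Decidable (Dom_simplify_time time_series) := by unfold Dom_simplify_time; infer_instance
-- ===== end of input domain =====

-- B replaces A's repeated full-list rescans (O(n^2)) with a single forward pass keeping a
-- running threshold (objective: faster, O(n)); return values agree on every nonempty list.

-- ===== PORT A =====
-- A's search_for_nearest: enumerate the distances, return the first index with distance ≥ 0, else 0.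
def searchAux : List Int → Int → Nat → Nat
  | [], _, _ => 0
  | t :: ts, v, k => if t - v ≥ 0 then k else searchAux ts v (k + 1)

def search_for_nearest (series : List Int) (value : Int) : Nat :=
  searchAux series value 0

-- A's `while True` loop.  The visited index strictly increases on every input (every position
-- before it is below the threshold), so `length + 1` fuel is never exhausted where the Python
-- returns; `getD _ 0` stands for time_series[index], whose only possible IndexError (empty
-- input, index 0) is excluded by Pre_.
def simplifyLoop (ts : List Int) : Nat → Nat → List Int → List Int
  | 0, _, acc => acc
  | fuel + 1, index, acc =>
    let acc' := acc ++ [ts.getD index 0]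
    let idx := search_for_nearest ts (ts.getD index 0 + 3600)
    if idx = 0 then acc' else simplifyLoop ts fuel idx acc'

def simplify_time (time_series : List Int) : List Int :=
  simplifyLoop time_series (time_series.length + 1) 0 []

-- ===== PORT B =====
-- B: seed with time_series[0] ([] raises in Python, excluded by Pre_), then one pass over the
-- tail appending t and resetting the threshold whenever t ≥ threshold.
def simplify_time_alt (time_series : List Int) : List Int :=
  match time_series with
  | [] => []
  | h :: rest =>
    (rest.foldl
      (fun (st : List Int × Int) t =>
        if t ≥ st.2 then (st.1 ++ [t], t + 3600) else st)
      ([h], h + 3600)).1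

-- ===== PRECONDITION & SPEC =====
-- Pre_ excludes exactly the empty list, on which Python A (and B) raise IndexError.
def Pre_simplify_time (time_series : List Int) : Prop := time_series ≠ []
instance (time_series : List Int) : Decidable (Pre_simplify_time time_series) := by
  unfold Pre_simplify_time; infer_instance

def pvWitness_simplify_time : List Int := ([0, 1800, 3600, 9000])

def Spec_simplify_time (time_series : List Int) (out : List Int) : Prop := out = simplify_time_alt time_series
instance (time_series : List Int) (out : List Int) : Decidable (Spec_simplify_time time_series out) := by unfold Spec_simplify_time; infer_instance

-- ===== CLAIM (what is proved, stated in full; the proofs are below) =====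
def Claim_equal_simplify_time : Prop := ∀ (time_series : List Int), Dom_simplify_time time_series → Pre_simplify_time time_series → Spec_simplify_time time_series (simplify_time time_series)

-- ===== LEMMAS AND PROOFS =====

-- The per-element action of B's single pass, without the accumulator.
def gPick : List Int → Int → List Int
  | [], _ => []
  | t :: ts, thr => if t ≥ thr then t :: gPick ts (t + 3600) else gPick ts thr

theorem foldB_eq_gPick (rest : List Int) : ∀ (acc : List Int) (thr : Int),
    (rest.foldl
      (fun (st : List Int × Int) t =>
        if t ≥ st.2 then (st.1 ++ [t], t + 3600) else st)
      (acc, thr)).1 = acc ++ gPick rest thr := by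
  induction rest with
  | nil => intro acc thr; simp [gPick]
  | cons t ts ih =>
    intro acc thr
    by_cases h : t ≥ thr
    · simp [List.foldl, gPick, h, ih]
    · simp [List.foldl, gPick, h, ih]

theorem alt_cons (h : Int) (rest : List Int) :
    simplify_time_alt (h :: rest) = h :: gPick rest (h + 3600) := by
  simp [simplify_time_alt, foldB_eq_gPick]

theorem gPick_nil_of_lt (thr : Int) (xs : List Int) (hall : ∀ x ∈ xs, x < thr) :
    gPick xs thr = [] := by
  induction xs with
  | nil => rfl
  | cons t ts ih =>
    have ht := hall t (by simp)
    simp only [gPick, if_neg (by omega : ¬ t ≥ thr)]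
    exact ih (fun x hx => hall x (by simp [hx]))

theorem searchAux_cases (v : Int) : ∀ (ts : List Int) (k : Nat),
    ((∀ x ∈ ts, x < v) ∧ searchAux ts v k = 0)
    ∨ (∃ j, j < ts.length ∧ v ≤ ts.getD j 0 ∧ (∀ q, q < j → ts.getD q 0 < v) ∧
        searchAux ts v k = k + j) := by
  intro ts
  induction ts with
  | nil => intro k; left; simp [searchAux]
  | cons t ts ih =>
    intro k
    by_cases h : t - v ≥ 0
    · right
      refine ⟨0, by simp, by simpa using (by omega : v ≤ t), fun q hq => absurd hq (by omega), ?_⟩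
      simp only [searchAux]; rw [if_pos h]; omega
    · rcases ih (k + 1) with ⟨hall, hval⟩ | ⟨j, hj, hv, hfirst, hval⟩
      · left
        refine ⟨?_, ?_⟩
        · intro x hx
          rcases List.mem_cons.mp hx with rfl | hx
          · omega
          · exact hall x hx
        · simp only [searchAux]; rw [if_neg h]; exact hval
      · right
        refine ⟨j + 1, by simpa using hj, by simpa using hv, ?_, ?_⟩
        · intro q hq
          cases q with
          | zero => simpa using (by omega : t < v)
          | succ q => exact hfirst q (by omega)
        · simp only [searchAux]; rw [if_neg h, hval]; omega

-- drop n = ts[n] :: drop (n+1), phrased with getD.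
theorem drop_eq_getD_cons (ts : List Int) (n : Nat) (hn : n < ts.length) :
    ts.drop n = ts.getD n 0 :: ts.drop (n + 1) := by
  rw [List.drop_eq_getElem_cons hn, List.getD_eq_getElem ts 0 hn]

-- On the suffix after position i, B's pass skips everything up to the first position j with
-- value ≥ v, appends ts[j] and resets the threshold.
theorem gPick_first (ts : List Int) (v : Int) : ∀ (d i j : Nat), j - (i + 1) = d → i < j →
    j < ts.length → v ≤ ts.getD j 0 → (∀ q, i < q → q < j → ts.getD q 0 < v) →
    gPick (ts.drop (i + 1)) v = ts.getD j 0 :: gPick (ts.drop (j + 1)) (ts.getD j 0 + 3600) := by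
  intro d
  induction d with
  | zero =>
    intro i j hd hij hj hv _
    have hji : j = i + 1 := by omega
    subst hji
    rw [drop_eq_getD_cons ts (i + 1) hj]
    simp only [gPick]
    rw [if_pos (by omega : ts.getD (i + 1) 0 ≥ v)]
  | succ d ih =>
    intro i j hd hij hj hv hbetween
    have hi1 : i + 1 < ts.length := by omega
    rw [drop_eq_getD_cons ts (i + 1) hi1]
    have hlt : ts.getD (i + 1) 0 < v := hbetween (i + 1) (by omega) (by omega)
    simp only [gPick, if_neg (by omega : ¬ ts.getD (i + 1) 0 ≥ v)]
    exact ih (i + 1) j (by omega) (by omega) hj hv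
      (fun q hq hq' => hbetween q (by omega) hq')

-- Main invariant: at every iteration of A's loop, every position ≤ index is below the
-- threshold, hence A's rescan from 0 finds exactly the next element B's forward pass keeps.
theorem loop_eq (ts : List Int) : ∀ (fuel i : Nat) (acc : List Int),
    i < ts.length → ts.length - i ≤ fuel →
    (∀ q, q < i → ts.getD q 0 < ts.getD i 0 + 3600) →
    simplifyLoop ts fuel i acc = acc ++ ts.getD i 0 :: gPick (ts.drop (i + 1)) (ts.getD i 0 + 3600) := by
  intro fuel
  induction fuel with
  | zero => intro i acc hi hfuel _; omega
  | succ fuel ih =>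
    intro i acc hi _ hinv
    rcases searchAux_cases (ts.getD i 0 + 3600) ts 0 with ⟨hall, hval⟩ | ⟨j, hj, hjv, hfirst, hval⟩
    · -- nothing ≥ v anywhere: the loop breaks, and B's pass keeps nothing more
      have hdrop : gPick (ts.drop (i + 1)) (ts.getD i 0 + 3600) = [] :=
        gPick_nil_of_lt _ _ (fun x hx => hall x (List.mem_of_mem_drop hx))
      simp only [simplifyLoop, search_for_nearest]
      rw [hval, if_pos rfl, hdrop]
    · -- first j with ts[j] ≥ v; j > i since everything ≤ i is < v
      have hij : i < j := by
        by_contra hle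
        have : ts.getD j 0 < ts.getD i 0 + 3600 := by
          rcases Nat.lt_or_ge j i with hji | hji
          · exact lt_of_lt_of_le (hinv j hji) (by omega)
          · have : j = i := by omega
            subst this; omega
        omega
      have step : simplifyLoop ts (fuel + 1) i acc
          = simplifyLoop ts fuel j (acc ++ [ts.getD i 0]) := by
        simp only [simplifyLoop, search_for_nearest]
        rw [hval, if_neg (by omega : ¬ 0 + j = 0), Nat.zero_add]
      rw [step, ih j (acc ++ [ts.getD i 0]) hj (by omega)
        (fun q hq => by have := hfirst q hq; omega)]
      rw [gPick_first ts (ts.getD i 0 + 3600) (j - (i + 1)) i j rfl hij hj hjv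
        (fun q hq hq' => hfirst q hq')]
      simp

-- ===== VERDICT (by name: the statement is the Claim_ definition above) =====
theorem simplify_time_spec : Claim_equal_simplify_time := by
  intro ts _ hpre
  unfold Spec_simplify_time
  match ts, hpre with
  | h :: rest, _ =>
    rw [alt_cons]
    have := loop_eq (h :: rest) ((h :: rest).length + 1) 0 [] (by simp)
      (by omega) (fun q hq => by omega)
    simpa [simplify_time] using this
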